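-- pv_equiv track=rewrite | github.com/retocali/Tabular | guitar.py | note_on_string
-- ===== SOURCE A (Python) =====
-- max_fret = 25
--
-- def note_on_string(note, string):
--     """Returns the fret a note would be on given string"""
--     amount = 0
--     while note != string:
--         string = string + 1
--         amount += 1
--         if (amount > max_fret):
--             return None
--     return amount
-- ===== SOURCE B (Python) =====
-- max_fret = 25
--
-- def note_on_string(note, string):
--     """Returns the fret a note would be on given string"""
--     diff = note - string
--     if 0 <= diff <= max_fret:
--         return diff
--     return None
-- ===== Notes on version B (the rewrite author's own statement) =====
-- stated objective: simpler
-- what changed: Replaced the increment-until-equal counting loop with the closed-form difference note - string, range-checked against [0, max_fret].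
import Mathlib
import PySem

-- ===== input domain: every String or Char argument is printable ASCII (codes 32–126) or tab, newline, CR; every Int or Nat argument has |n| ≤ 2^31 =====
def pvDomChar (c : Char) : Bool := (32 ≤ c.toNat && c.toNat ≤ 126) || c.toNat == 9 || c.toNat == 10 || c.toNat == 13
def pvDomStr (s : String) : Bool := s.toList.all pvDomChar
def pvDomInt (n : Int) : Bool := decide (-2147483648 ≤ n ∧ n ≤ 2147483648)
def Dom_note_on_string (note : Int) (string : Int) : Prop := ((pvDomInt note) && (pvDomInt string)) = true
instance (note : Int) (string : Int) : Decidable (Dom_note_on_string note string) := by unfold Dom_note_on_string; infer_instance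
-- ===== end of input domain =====

-- B replaces A's increment-until-equal counting loop with the closed form note - string range-checked against [0, 25] (objective: simpler).

-- ===== PORT A =====
-- A's while loop: amount starts at 0; fuel 26 suffices because the loop returns
-- None as soon as amount exceeds 25, so amount ≤ 25 at every recursive call and
-- the fuel-0 branch is never reached.
def noteLoopA (note : Int) (string : Int) (amount : Int) : Nat → Option Int
  | 0 => none
  | f + 1 =>
    if note ≠ string then
      let string' := string + 1
      let amount' := amount + 1
      if amount' > 25 then none
      else noteLoopA note string' amount' f
    else some amount

def note_on_string (note : Int) (string : Int) : Option Int :=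
  noteLoopA note string 0 26

-- ===== PORT B =====
def note_on_string_alt (note : Int) (string : Int) : Option Int :=
  let diff := note - string
  if 0 ≤ diff ∧ diff ≤ 25 then some diff else none

-- ===== PRECONDITION & SPEC =====
def Spec_note_on_string (note : Int) (string : Int) (out : Option Int) : Prop := out = note_on_string_alt note string
instance (note : Int) (string : Int) (out : Option Int) : Decidable (Spec_note_on_string note string out) := by unfold Spec_note_on_string; infer_instance

-- ===== CLAIM (what is proved, stated in full; the proofs are below) =====
def Claim_equal_note_on_string : Prop := ∀ (note : Int) (string : Int), Dom_note_on_string note string → Spec_note_on_string note string (note_on_string note string)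

-- ===== LEMMAS AND PROOFS =====
theorem noteLoopA_eq (f : Nat) : ∀ (note string a : Int), a + f = 26 → 0 ≤ a → a ≤ 25 →
    noteLoopA note string a f =
      if 0 ≤ note - string ∧ note - string ≤ 25 - a then some (note - string + a) else none := by
  induction f with
  | zero => intro note string a h1 h2 h3; omega
  | succ f ih =>
    intro note string a h1 h2 h3
    simp only [noteLoopA]
    by_cases hne : note = string
    · subst hne
      simp only [ne_eq, not_true_eq_false, if_false]
      rw [if_pos ⟨by omega, by omega⟩]
      simp
    · rw [if_pos hne]
      by_cases hb : a + 1 > 25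
      · rw [if_pos hb, if_neg]
        intro ⟨hc1, hc2⟩
        have : note = string := by omega
        exact hne this
      · rw [if_neg hb, ih note (string + 1) (a + 1) (by omega) (by omega) (by omega)]
        by_cases hc : 0 ≤ note - string ∧ note - string ≤ 25 - a
        · rw [if_pos ⟨by omega, by omega⟩, if_pos hc]
          congr 1; omega
        · rw [if_neg (by omega), if_neg hc]

-- ===== VERDICT (by name: the statement is the Claim_ definition above) =====
theorem note_on_string_spec : Claim_equal_note_on_string := by
  intro note string _
  unfold Spec_note_on_string note_on_string note_on_string_alt
  rw [noteLoopA_eq 26 note string 0 (by omega) (by omega) (by omega)]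
  simp
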